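-- pv_equiv track=rewrite | github.com/MataNerdy/CayleyPy_Pancake | app.py | path_to_states
-- ===== SOURCE A (Python) =====
-- def path_to_states(start: list[int], moves: list[int]) -> list[list[int]]:
--     states = [list(start)]
--     cur = list(start)
--
--     for k in moves:
--         cur = list(cur)
--         cur[:k] = reversed(cur[:k])
--         states.append(list(cur))
--
--     return states
-- ===== SOURCE B (Python) =====
-- def path_to_states(start: list[int], moves: list[int]) -> list[list[int]]:
--     # Structural recursion on moves: each call conses the current state onto the
--     # states of the remaining moves; the flip is a purely functional expression
--     # (slice-reverse-concat), no mutable running copy or accumulator list.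
--     def go(cur: list[int], rest: list[int]) -> list[list[int]]:
--         if not rest:
--             return [cur]
--         k = rest[0]
--         return [cur] + go(cur[:k][::-1] + cur[k:], rest[1:])
--     return go(list(start), moves)
-- ===== Notes on version B (the rewrite author's own statement) =====
-- stated objective: alternative
-- what changed: B replaces A's imperative loop (mutable running copy, in-place slice assignment, appending to a states accumulator) by a structural recursion on moves that conses each state onto the recursively built tail, flipping with a purely functional slice-reverse-concat expression.
import Mathlib
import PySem

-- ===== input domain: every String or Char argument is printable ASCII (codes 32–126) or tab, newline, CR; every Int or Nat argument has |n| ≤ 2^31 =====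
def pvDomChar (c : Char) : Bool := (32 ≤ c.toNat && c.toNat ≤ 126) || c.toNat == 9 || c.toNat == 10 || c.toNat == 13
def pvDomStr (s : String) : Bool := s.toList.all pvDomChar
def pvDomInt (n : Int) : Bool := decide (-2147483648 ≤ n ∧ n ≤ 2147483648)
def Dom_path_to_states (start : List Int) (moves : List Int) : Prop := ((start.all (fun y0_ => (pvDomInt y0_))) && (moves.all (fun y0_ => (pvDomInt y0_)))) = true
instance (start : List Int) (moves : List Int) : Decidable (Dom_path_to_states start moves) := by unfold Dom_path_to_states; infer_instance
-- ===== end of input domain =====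

-- B is a structural recursion on moves with a functional flip, instead of A's loop with in-place slice assignment and an accumulator (objective: alternative).

-- ===== PORT A =====
-- cur[:k] = reversed(cur[:k]): slice assignment whose RHS has the slice's length,
-- so the result is exactly reverse(cur[:k]) ++ cur[k:] (exact for any Int k).
def pvFlipA (cur : List Int) (k : Int) : List Int :=
  (PySem.List.slice cur none (some k)).reverse ++ PySem.List.slice cur (some k) none

def path_to_states (start : List Int) (moves : List Int) : List (List Int) :=
  (moves.foldl
    (fun (st : List (List Int) × List Int) k =>
      let cur := pvFlipA st.2 k
      (st.1 ++ [cur], cur))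
    ([start], start)).1

-- ===== PORT B =====
-- go(cur, rest): [cur] if rest empty, else [cur] + go(cur[:k][::-1] + cur[k:], rest[1:])
def pvGo (cur : List Int) : List Int → List (List Int)
  | [] => [cur]
  | k :: ks =>
    cur :: pvGo ((PySem.List.slice cur none (some k)).reverse ++ PySem.List.slice cur (some k) none) ks

def path_to_states_alt (start : List Int) (moves : List Int) : List (List Int) :=
  pvGo start moves

-- ===== PRECONDITION & SPEC =====
def Spec_path_to_states (start : List Int) (moves : List Int) (out : List (List Int)) : Prop := out = path_to_states_alt start moves
instance (start : List Int) (moves : List Int) (out : List (List Int)) : Decidable (Spec_path_to_states start moves out) := by unfold Spec_path_to_states; infer_instance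

-- ===== CLAIM (what is proved, stated in full; the proofs are below) =====
def Claim_equal_path_to_states : Prop := ∀ (start : List Int) (moves : List Int), Dom_path_to_states start moves → Spec_path_to_states start moves (path_to_states start moves)

-- ===== LEMMAS AND PROOFS =====

-- A's loop, started from any accumulator, appends exactly the tail that pvGo conses.
theorem pv_A_loop (moves : List Int) (states : List (List Int)) (cur : List Int) :
    (moves.foldl
      (fun (st : List (List Int) × List Int) k =>
        let c := pvFlipA st.2 k
        (st.1 ++ [c], c))
      (states, cur)).1 = states ++ (pvGo cur moves).tail := by
  induction moves generalizing states cur with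
  | nil => simp [pvGo]
  | cons k ks ih =>
    have h := ih (states ++ [pvFlipA cur k]) (pvFlipA cur k)
    simp only [List.foldl_cons]
    exact h.trans (by cases ks <;> simp [pvGo, pvFlipA])

-- ===== VERDICT (by name: the statement is the Claim_ definition above) =====
theorem path_to_states_spec : Claim_equal_path_to_states := by
  intro start moves _
  unfold Spec_path_to_states path_to_states path_to_states_alt
  rw [pv_A_loop]
  cases moves <;> simp [pvGo]
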